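-- pv_equiv track=rewrite | github.com/DhrumilDave5/Le_Giant_Maze | Game_Files/camera.py | give_shades_list
-- ===== SOURCE A (Python) =====
-- def give_shades_list(base_colour: tuple[int]) -> tuple[tuple[int]]:
--     shades_list = []
--     for i in range(8):
--         rgb_list = []
--         for j in base_colour:
--             x = j - (i * ((j + 1) // 8))
--             # j- 1, because range of integers used to describe in RGB is
--             # 0-255 and not 1-256
--             if x < 5:  # (0, 0, 0) to (4, 4, 4) is almost invisible
--                 x = 5
--             rgb_list.append(x)
--         shades_list.append(tuple(rgb_list))
--     return tuple(shades_list)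
-- ===== SOURCE B (Python) =====
-- def give_shades_list(base_colour: tuple[int]) -> tuple[tuple[int]]:
--     steps = [(j + 1) // 8 for j in base_colour]
--     cur = list(base_colour)
--     shades = []
--     for _ in range(8):
--         shades.append(tuple(v if v >= 5 else 5 for v in cur))
--         cur = [v - s for v, s in zip(cur, steps)]
--     return tuple(shades)
-- ===== Notes on version B (the rewrite author's own statement) =====
-- stated objective: alternative
-- what changed: Computes each channel's step once and maintains a running list of current channel values, subtracting the step each iteration, instead of recomputing j - i*((j+1)//8) from the index for every shade.
import Mathlib
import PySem

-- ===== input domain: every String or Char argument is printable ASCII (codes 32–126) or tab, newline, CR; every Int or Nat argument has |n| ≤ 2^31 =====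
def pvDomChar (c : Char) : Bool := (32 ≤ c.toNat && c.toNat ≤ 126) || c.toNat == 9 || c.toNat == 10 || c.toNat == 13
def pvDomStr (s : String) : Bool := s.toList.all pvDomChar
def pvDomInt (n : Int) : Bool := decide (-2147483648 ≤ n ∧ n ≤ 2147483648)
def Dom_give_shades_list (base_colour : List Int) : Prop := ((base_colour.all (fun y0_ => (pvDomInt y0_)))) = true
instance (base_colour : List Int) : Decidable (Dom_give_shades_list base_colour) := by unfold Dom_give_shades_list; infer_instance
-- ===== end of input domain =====

-- B replaces A's index formula by a per-channel step computed once and a running list of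
-- current channel values (subtract the step each iteration); same output, same cost (alternative).

-- ===== PORT A =====
def give_shades_list (base_colour : List Int) : List (List Int) :=
  (PySem.List.pyRange 0 8 1).foldl (fun shades_list i =>
    shades_list ++ [ base_colour.foldl (fun rgb_list j =>
      let x := j - i * (PySem.Int.floordiv (j + 1) 8)
      let x := if x < 5 then 5 else x
      rgb_list ++ [x]) [] ]) []

-- ===== PORT B =====
-- the 'for _ in range(8)' loop of Source B, with its state (shades built front-to-back, cur, steps)
def giveShadesLoop : Nat → List Int → List Int → List (List Int)
  | 0, _, _ => []
  | n + 1, cur, steps =>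
      (cur.map (fun v => if v ≥ 5 then v else 5)) ::
        giveShadesLoop n (List.zipWith (fun v s => v - s) cur steps) steps

def give_shades_list_alt (base_colour : List Int) : List (List Int) :=
  let steps := base_colour.map (fun j => PySem.Int.floordiv (j + 1) 8)
  giveShadesLoop 8 base_colour steps

-- ===== PRECONDITION & SPEC =====
def Spec_give_shades_list (base_colour : List Int) (out : List (List Int)) : Prop := out = give_shades_list_alt base_colour
instance (base_colour : List Int) (out : List (List Int)) : Decidable (Spec_give_shades_list base_colour out) := by unfold Spec_give_shades_list; infer_instance

-- ===== CLAIM (what is proved, stated in full; the proofs are below) =====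
def Claim_equal_give_shades_list : Prop := ∀ (base_colour : List Int), Dom_give_shades_list base_colour → Spec_give_shades_list base_colour (give_shades_list base_colour)

-- ===== LEMMAS AND PROOFS =====

-- the shade at index i, as a closed form both programs are reduced to
def pvRow (base : List Int) (i : Int) : List Int :=
  base.map (fun j =>
    let x := j - i * PySem.Int.floordiv (j + 1) 8
    if x < 5 then 5 else x)

theorem giveShadesLoop_eq (n : Nat) : ∀ (i : Int) (base : List Int),
    giveShadesLoop n (base.map (fun j => j - i * PySem.Int.floordiv (j + 1) 8))
        (base.map (fun j => PySem.Int.floordiv (j + 1) 8))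
      = (List.range n).map (fun k : Nat => pvRow base (i + (k : Int))) := by
  induction n with
  | zero => intro i base; simp [giveShadesLoop]
  | succ n ih =>
    intro i base
    rw [List.range_succ_eq_map]
    simp only [giveShadesLoop]
    rw [List.map_cons]
    congr 1
    · simp only [List.map_map, pvRow]
      refine List.map_congr_left (fun j _ => ?_)
      simp only [Function.comp, Nat.cast_zero, add_zero]
      split_ifs <;> omega
    · rw [show (List.zipWith (fun v s => v - s)
              (base.map fun j => j - i * PySem.Int.floordiv (j + 1) 8)
              (base.map fun j => PySem.Int.floordiv (j + 1) 8))
            = base.map (fun j => j - (i + 1) * PySem.Int.floordiv (j + 1) 8) from by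
        induction base with
        | nil => rfl
        | cons a t iht => simp only [List.map_cons, List.zipWith_cons_cons, iht]; ring_nf]
      rw [ih (i + 1) base, List.map_map]
      refine List.map_congr_left (fun k _ => ?_)
      simp only [Function.comp]
      congr 1
      push_cast
      ring

theorem inner_foldl (base : List Int) (i : Int) :
    base.foldl (fun rgb_list j =>
      let x := j - i * (PySem.Int.floordiv (j + 1) 8)
      let x := if x < 5 then 5 else x
      rgb_list ++ [x]) [] = pvRow base i := by
  simpa [pvRow] using
    PySem.List.foldl_append_singleton_eq_map
      (f := fun j => let x := j - i * (PySem.Int.floordiv (j + 1) 8); if x < 5 then 5 else x)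
      (l := base) (acc := [])

-- ===== VERDICT (by name: the statement is the Claim_ definition above) =====
theorem give_shades_list_spec : Claim_equal_give_shades_list := by
  intro base _
  show give_shades_list base = give_shades_list_alt base
  have hA : give_shades_list base
      = [pvRow base 0, pvRow base 1, pvRow base 2, pvRow base 3,
         pvRow base 4, pvRow base 5, pvRow base 6, pvRow base 7] := by
    have hr : PySem.List.pyRange 0 8 1 = [0,1,2,3,4,5,6,7] := by decide
    simp only [give_shades_list, hr, List.foldl_cons, List.foldl_nil,
      List.nil_append, inner_foldl]
    simp
  have hB : give_shades_list_alt base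
      = [pvRow base 0, pvRow base 1, pvRow base 2, pvRow base 3,
         pvRow base 4, pvRow base 5, pvRow base 6, pvRow base 7] := by
    have h0 : base = base.map (fun j => j - (0 : Int) * PySem.Int.floordiv (j + 1) 8) := by
      simp
    calc give_shades_list_alt base
        = giveShadesLoop 8 (base.map (fun j => j - (0:Int) * PySem.Int.floordiv (j + 1) 8))
            (base.map (fun j => PySem.Int.floordiv (j + 1) 8)) := by
          rw [give_shades_list_alt]; rw [← h0]
      _ = (List.range 8).map (fun k : Nat => pvRow base ((0:Int) + (k : Int))) := giveShadesLoop_eq 8 0 base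
      _ = _ := by
          simp [List.range_succ]
  rw [hA, hB]
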